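-- pv_equiv track=rewrite | github.com/VictorOhachor/random-team-generator | scanner.py | scan_inst
-- ===== SOURCE A (Python) =====
-- def _add_token(token: str, tokens: list) -> str:
--     """Add token to tokens if not empty."""
--     if token:
--         tokens.append(token)
--         token = ''
--     return token
--
-- def scan_inst(inst: str) -> list:
--     """Scan and split instruction into tokens."""
--     tokens = []
--     token = ''
--
--     chars_set = list(inst)
--
--     while chars_set:
--         c = chars_set.pop(0)
--
--         if c == ' ' or c == '\n':
--             token = _add_token(token, tokens)
--         else:
--             token += c
--
--         if c == '#':
--             break
--     return tokens
-- ===== SOURCE B (Python) =====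
-- def scan_inst(inst: str) -> list:
--     """Scan and split instruction into tokens (partition-then-filter)."""
--     head = inst.split('#', 1)[0]
--     parts = head.replace('\n', ' ').split(' ')
--     # the token in progress at end-of-scan is never flushed, so drop the last part
--     return [p for p in parts[:-1] if p]
-- ===== Notes on version B (the rewrite author's own statement) =====
-- stated objective: faster
-- what changed: Replaces A's while-loop character accumulator (which pops the front of a list each step) with a partition-then-filter pipeline: cut at the first comment marker, map newlines to spaces, split on spaces, drop the never-flushed last part and the empty parts.
import Mathlib
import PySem

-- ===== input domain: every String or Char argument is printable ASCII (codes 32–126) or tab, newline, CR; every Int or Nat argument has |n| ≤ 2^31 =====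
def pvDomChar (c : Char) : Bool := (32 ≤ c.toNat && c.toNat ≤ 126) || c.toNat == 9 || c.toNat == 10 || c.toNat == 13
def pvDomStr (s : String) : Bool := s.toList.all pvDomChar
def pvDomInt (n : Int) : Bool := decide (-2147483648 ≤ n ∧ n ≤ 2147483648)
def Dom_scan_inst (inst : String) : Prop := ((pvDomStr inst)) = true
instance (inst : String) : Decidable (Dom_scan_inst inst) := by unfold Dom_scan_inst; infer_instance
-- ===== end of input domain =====

-- B replaces A's character-by-character accumulator scan (quadratic: pop(0) per step) with a
-- linear partition-then-filter pipeline: cut at the first '#', split on the separators, drop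
-- the never-flushed last part and the empty parts; measured faster.

-- ===== PORT A =====
-- `_add_token`: flush the current token into `tokens` if non-empty.
def pvAddToken (token : List Char) (tokens : List String) : List Char × List String :=
  if token ≠ [] then ([], tokens ++ [String.ofList token]) else (token, tokens)

-- the `while chars_set:` loop of A: pop the front char, separator flushes, else extend token,
-- '#' breaks out of the loop.
def pvScanLoop : List Char → List Char → List String → List String
  | [], _, tokens => tokens
  | c :: rest, token, tokens =>
    let st := if c = ' ' ∨ c = '\n' then pvAddToken token tokens
              else (token ++ [c], tokens)
    if c = '#' then st.2 else pvScanLoop rest st.1 st.2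

def scan_inst (inst : String) : List String := pvScanLoop inst.toList [] []

-- ===== PORT B =====
-- head = inst.split('#', 1)[0]; parts = head.replace('\n',' ').split(' ');
-- return [p for p in parts[:-1] if p]
def scan_inst_alt (inst : String) : List String :=
  let head := ((PySem.Str.splitMax? inst "#" 1).getD []).headD ""
  let parts := (PySem.Str.split? (PySem.Str.replace head "\n" " ") " ").getD []
  parts.dropLast.filter (fun p => p ≠ "")

-- ===== PRECONDITION & SPEC =====
def Spec_scan_inst (inst : String) (out : List String) : Prop := out = scan_inst_alt inst
instance (inst : String) (out : List String) : Decidable (Spec_scan_inst inst out) := by unfold Spec_scan_inst; infer_instance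

-- ===== CLAIM (what is proved, stated in full; the proofs are below) =====
def Claim_equal_scan_inst : Prop := ∀ (inst : String), Dom_scan_inst inst → Spec_scan_inst inst (scan_inst inst)

-- ===== LEMMAS AND PROOFS =====

-- split a char list on a single separator char (spec form of Python's str.split(' '))
def splitCh (sep : Char) : List Char → List (List Char)
  | [] => [[]]
  | c :: rest =>
    if c = sep then [] :: splitCh sep rest
    else
      match splitCh sep rest with
      | [] => [[c]]
      | p :: ps => (c :: p) :: ps

-- prepend chars onto the first piece
def consHead (x : List Char) : List (List Char) → List (List Char)
  | [] => [x]
  | p :: ps => (x ++ p) :: ps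

theorem splitCh_ne_nil (sep : Char) (l : List Char) : splitCh sep l ≠ [] := by
  cases l with
  | nil => simp [splitCh]
  | cons c rest =>
    simp only [splitCh]
    split
    · simp
    · split <;> simp

theorem consHead_append (x y : List Char) (ps : List (List Char)) :
    consHead (x ++ y) ps = consHead x (consHead y ps) := by
  cases ps <;> simp [consHead]

-- PySem's splitOn on a single-char separator is splitCh
theorem splitOn_go_eq (sep : Char) (l : List Char) : ∀ (fuel : Nat) (cur : List Char)
    (acc : List (List Char)), l.length ≤ fuel →
    PySem.Chars.splitOn.go [sep] fuel l cur acc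
      = acc.reverse ++ consHead cur.reverse (splitCh sep l) := by
  induction l with
  | nil =>
    intro fuel cur acc _
    cases fuel <;> simp [PySem.Chars.splitOn.go, splitCh, consHead]
  | cons c rest ih =>
    intro fuel cur acc hf
    cases fuel with
    | zero => simp at hf
    | succ f =>
      simp only [List.length_cons, Nat.succ_le_succ_iff] at hf
      by_cases hc : c = sep
      · subst hc
        rw [show PySem.Chars.splitOn.go [c] (f+1) (c :: rest) cur acc
            = PySem.Chars.splitOn.go [c] f rest [] (cur.reverse :: acc) by
          simp [PySem.Chars.splitOn.go, List.isPrefixOf]]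
        rw [ih f [] (cur.reverse :: acc) hf]
        obtain ⟨p, ps, hps⟩ := List.exists_cons_of_ne_nil (splitCh_ne_nil c rest)
        simp [splitCh, hps, consHead]
      · rw [show PySem.Chars.splitOn.go [sep] (f+1) (c :: rest) cur acc
            = PySem.Chars.splitOn.go [sep] f rest (c :: cur) acc by
          have hcs : sep ≠ c := Ne.symm hc
          simp [PySem.Chars.splitOn.go, List.isPrefixOf, hcs]]
        rw [ih f (c :: cur) acc hf]
        obtain ⟨p, ps, hps⟩ := List.exists_cons_of_ne_nil (splitCh_ne_nil sep rest)
        simp [splitCh, hc, hps, consHead]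

theorem splitOn_singleton (sep : Char) (l : List Char) :
    PySem.Chars.splitOn l [sep] = splitCh sep l := by
  have h := splitOn_go_eq sep l (l.length + 1) [] [] (by omega)
  simp only [PySem.Chars.splitOn, h, List.reverse_nil, List.nil_append]
  obtain ⟨p, ps, hps⟩ := List.exists_cons_of_ne_nil (splitCh_ne_nil sep l)
  simp [hps, consHead]

-- split(sep, 1): the first piece is everything before the first separator
theorem splitOnMax_go_zero (sep : Char) (fuel : Nat) (l : List Char)
    (acc : List (List Char)) :
    ∃ r, PySem.Chars.splitOnMax.go [sep] fuel 0 l [] acc = acc.reverse ++ [r] := by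
  cases fuel with
  | zero => exact ⟨l, by simp [PySem.Chars.splitOnMax.go]⟩
  | succ f =>
    cases l with
    | nil => exact ⟨[], by simp [PySem.Chars.splitOnMax.go]⟩
    | cons c rest => exact ⟨c :: rest, by simp [PySem.Chars.splitOnMax.go]⟩

theorem splitOnMax_go_one (sep : Char) (l : List Char) : ∀ (fuel : Nat) (cur : List Char)
    (acc : List (List Char)), l.length ≤ fuel →
    ∃ t, PySem.Chars.splitOnMax.go [sep] fuel 1 l cur acc
      = acc.reverse ++ (cur.reverse ++ l.takeWhile (· ≠ sep)) :: t := by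
  induction l with
  | nil =>
    intro fuel cur acc _
    cases fuel <;> exact ⟨[], by simp [PySem.Chars.splitOnMax.go]⟩
  | cons c rest ih =>
    intro fuel cur acc hf
    cases fuel with
    | zero => simp at hf
    | succ f =>
      simp only [List.length_cons, Nat.succ_le_succ_iff] at hf
      by_cases hc : c = sep
      · subst hc
        rw [show PySem.Chars.splitOnMax.go [c] (f+1) 1 (c :: rest) cur acc
            = PySem.Chars.splitOnMax.go [c] f 0 rest [] (cur.reverse :: acc) by
          simp [PySem.Chars.splitOnMax.go, List.isPrefixOf]]
        obtain ⟨r, hr⟩ := splitOnMax_go_zero c f rest (cur.reverse :: acc)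
        exact ⟨[r], by simp [hr, List.takeWhile]⟩
      · rw [show PySem.Chars.splitOnMax.go [sep] (f+1) 1 (c :: rest) cur acc
            = PySem.Chars.splitOnMax.go [sep] f 1 rest (c :: cur) acc by
          have hcs : sep ≠ c := Ne.symm hc
          simp [PySem.Chars.splitOnMax.go, List.isPrefixOf, hcs]]
        obtain ⟨t, ht⟩ := ih f (c :: cur) acc hf
        exact ⟨t, by simp [ht, List.takeWhile, hc]⟩

theorem splitOnMax_one_head (sep : Char) (l : List Char) :
    ∃ t, PySem.Chars.splitOnMax l [sep] 1 = l.takeWhile (· ≠ sep) :: t := by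
  obtain ⟨t, ht⟩ := splitOnMax_go_one sep l (l.length + 1) [] [] (by omega)
  exact ⟨t, by simpa [PySem.Chars.splitOnMax] using ht⟩

-- single-char replace is a map
def pvNl2Sp (c : Char) : Char := if c = '\n' then ' ' else c

theorem replace_go_eq (l : List Char) : ∀ (fuel : Nat) (acc : List Char), l.length ≤ fuel →
    PySem.Chars.replace.go ['\n'] [' '] fuel l acc = acc.reverse ++ l.map pvNl2Sp := by
  induction l with
  | nil =>
    intro fuel acc _
    cases fuel <;> simp [PySem.Chars.replace.go]
  | cons c rest ih =>
    intro fuel acc hf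
    cases fuel with
    | zero => simp at hf
    | succ f =>
      simp only [List.length_cons, Nat.succ_le_succ_iff] at hf
      by_cases hc : c = '\n'
      · subst hc
        rw [show PySem.Chars.replace.go ['\n'] [' '] (f+1) ('\n' :: rest) acc
            = PySem.Chars.replace.go ['\n'] [' '] f rest (' ' :: acc) by
          simp [PySem.Chars.replace.go, List.isPrefixOf]]
        simp [ih f (' ' :: acc) hf, pvNl2Sp]
      · rw [show PySem.Chars.replace.go ['\n'] [' '] (f+1) (c :: rest) acc
            = PySem.Chars.replace.go ['\n'] [' '] f rest (c :: acc) by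
          have hcs : '\n' ≠ c := Ne.symm hc
          simp [PySem.Chars.replace.go, List.isPrefixOf, hcs]]
        simp [ih f (c :: acc) hf, pvNl2Sp, hc]

theorem replace_nl_sp (l : List Char) :
    PySem.Chars.replace l ['\n'] [' '] = l.map pvNl2Sp := by
  simpa [PySem.Chars.replace] using replace_go_eq l l.length [] le_rfl

-- the char stream B effectively tokenizes: up to the first '#', newlines turned into spaces
def pvStream (cs : List Char) : List Char := (cs.takeWhile (· ≠ '#')).map pvNl2Sp

-- A's loop invariant: with a separator-free pending token, the loop computes exactly
-- B's partition-then-filter of (token ++ pvStream cs)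
theorem pvScanLoop_eq (cs : List Char) : ∀ (token : List Char) (tokens : List String),
    ' ' ∉ token → '\n' ∉ token →
    pvScanLoop cs token tokens
      = tokens ++ ((consHead token (splitCh ' ' (pvStream cs))).dropLast.filter
          (fun p => p ≠ [])).map String.ofList := by
  induction cs with
  | nil =>
    intro token tokens _ _
    simp [pvScanLoop, pvStream, splitCh, consHead]
  | cons c rest ih =>
    intro token tokens hsp hnl
    by_cases hh : c = '#'
    · subst hh
      simp [pvScanLoop, pvStream, List.takeWhile, splitCh, consHead]
    · by_cases hc : c = ' ' ∨ c = '\n'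
      · have hstr : pvStream (c :: rest) = ' ' :: pvStream rest := by
          rcases hc with hc | hc <;> subst hc <;> simp [pvStream, List.takeWhile, pvNl2Sp]
        have hne : c ≠ '#' := hh
        obtain ⟨p, ps, hps⟩ := List.exists_cons_of_ne_nil (splitCh_ne_nil ' ' (pvStream rest))
        have hrhs : consHead token (splitCh ' ' (pvStream (c :: rest)))
            = token :: splitCh ' ' (pvStream rest) := by
          simp [hstr, splitCh, consHead]
        by_cases ht : token = []
        · subst ht
          have hflush : pvScanLoop (c :: rest) [] tokens = pvScanLoop rest [] tokens := by
            simp [pvScanLoop, hc, hne, pvAddToken]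
          rw [hflush, ih [] tokens (by simp) (by simp), hrhs, hps]
          simp [consHead]
        · have hflush : pvScanLoop (c :: rest) token tokens
              = pvScanLoop rest [] (tokens ++ [String.ofList token]) := by
            simp [pvScanLoop, hc, hne, pvAddToken, ht]
          rw [hflush, ih [] (tokens ++ [String.ofList token]) (by simp) (by simp)]
          rw [hrhs, hps]
          have hd : (token :: p :: ps).dropLast = token :: (p :: ps).dropLast := by
            simp
          simp only [hd, List.filter_cons, consHead]
          simp [ht]
      · rw [not_or] at hc
        obtain ⟨hc1, hc2⟩ := hc
        have hstep : pvScanLoop (c :: rest) token tokens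
            = pvScanLoop rest (token ++ [c]) tokens := by
          simp [pvScanLoop, hc1, hc2, hh]
        have hstr : pvStream (c :: rest) = c :: pvStream rest := by
          simp [pvStream, List.takeWhile, hh, pvNl2Sp, hc2]
        rw [hstep, ih (token ++ [c]) tokens (by simp [hsp, Ne.symm hc1])
          (by simp [hnl, Ne.symm hc2])]
        have : splitCh ' ' (pvStream (c :: rest)) = consHead [c] (splitCh ' ' (pvStream rest)) := by
          obtain ⟨p, ps, hps⟩ := List.exists_cons_of_ne_nil (splitCh_ne_nil ' ' (pvStream rest))
          simp [hstr, splitCh, hc1, hps, consHead]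
        rw [this, ← consHead_append]

-- B's port, reduced to the same pipeline on char lists
theorem str_replace_ofList (l : List Char) :
    PySem.Str.replace (String.ofList l) "\n" " " = String.ofList (l.map pvNl2Sp) := by
  rw [PySem.Str.replace, String.toList_ofList,
    show ("\n" : String).toList = ['\n'] from rfl, show (" " : String).toList = [' '] from rfl,
    replace_nl_sp]

theorem str_split_ofList (l : List Char) :
    PySem.Str.split? (String.ofList l) " "
      = some ((splitCh ' ' l).map String.ofList) := by
  rw [PySem.Str.split?, String.toList_ofList,
    show (" " : String).toList = [' '] from rfl, PySem.Chars.split?]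
  simp [splitOn_singleton]

theorem scan_inst_alt_eq (inst : String) :
    scan_inst_alt inst
      = ((splitCh ' ' (pvStream inst.toList)).dropLast.filter
          (fun p => p ≠ [])).map String.ofList := by
  obtain ⟨t, ht⟩ := splitOnMax_one_head '#' inst.toList
  have hsplit : PySem.Str.splitMax? inst "#" 1
      = some ((inst.toList.takeWhile (· ≠ '#') :: t).map String.ofList) := by
    rw [PySem.Str.splitMax?, show ("#" : String).toList = ['#'] from rfl,
      PySem.Chars.splitMax?, ht]
    rfl
  show ((PySem.Str.split? (PySem.Str.replace
      (((PySem.Str.splitMax? inst "#" 1).getD []).headD "") "\n" " ") " ").getD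
        []).dropLast.filter (fun p => p ≠ "") = _
  rw [hsplit]
  show ((PySem.Str.split? (PySem.Str.replace
      (String.ofList (inst.toList.takeWhile (· ≠ '#'))) "\n" " ") " ").getD
        []).dropLast.filter (fun p => p ≠ "") = _
  rw [str_replace_ofList, str_split_ofList]
  show ((((splitCh ' ' ((inst.toList.takeWhile (· ≠ '#')).map pvNl2Sp)).map
      String.ofList)).dropLast).filter (fun p => p ≠ "") = _
  rw [← List.map_dropLast, List.filter_map]
  congr 1
  apply List.filter_congr
  intro p _
  simp [Function.comp]

-- ===== VERDICT (by name: the statement is the Claim_ definition above) =====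
theorem scan_inst_spec : Claim_equal_scan_inst := by
  intro inst _
  unfold Spec_scan_inst scan_inst
  rw [pvScanLoop_eq inst.toList [] [] (by simp) (by simp), scan_inst_alt_eq]
  obtain ⟨p, ps, hps⟩ := List.exists_cons_of_ne_nil (splitCh_ne_nil ' ' (pvStream inst.toList))
  simp [hps, consHead]
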